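-- pv_equiv track=rewrite | github.com/DIG-Network/proof_research | sub-problems/verifier-oracle-model/experiments/adaptive-coordinate-or-rsparse-xor-tree-depth-wt-two-n5/script.py | build_r_xor_partition_masks
-- ===== SOURCE A (Python) =====
-- from itertools import combinations
--
-- N = 5
--
-- def build_r_xor_partition_masks(masks: list[int], r: int) -> list[tuple[int, int]]:
--     dom = len(masks)
--     full = (1 << dom) - 1
--     out: list[tuple[int, int]] = []
--     for idxs in combinations(range(N), r):
--         b0 = 0
--         for ki, mm in enumerate(masks):
--             p = 0
--             for i in idxs:
--                 p ^= (mm >> i) & 1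
--             if p == 0:
--                 b0 |= 1 << ki
--         b1 = full ^ b0
--         out.append((b0, b1))
--     return out
-- ===== SOURCE B (Python) =====
-- from itertools import combinations
--
-- N = 5
--
-- def build_r_xor_partition_masks(masks: list[int], r: int) -> list[tuple[int, int]]:
--     full = (1 << len(masks)) - 1
--     out: list[tuple[int, int]] = []
--     combos = list(combinations(range(N), r))
--     if combos:
--         # transpose: cols[i] packs bit i of every mask, one bit per mask index
--         cols = [sum(((mm >> i) & 1) << ki for ki, mm in enumerate(masks)) for i in range(N)]
--         for idxs in combos:
--             b1 = 0
--             for i in idxs: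
--                 b1 ^= cols[i]
--             out.append((full ^ b1, b1))
--     return out
-- ===== Notes on version B (the rewrite author's own statement) =====
-- stated objective: alternative
-- what changed: B transposes the mask matrix once into N=5 column bitmasks (cols[i] packs bit i of every mask) and computes each combination's odd-parity membership mask b1 as a bit-parallel XOR of at most r column integers (b0 = full ^ b1), replacing A's per-combination per-mask inner parity loop; the transpose is skipped when there are no combinations at all.
import Mathlib
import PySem

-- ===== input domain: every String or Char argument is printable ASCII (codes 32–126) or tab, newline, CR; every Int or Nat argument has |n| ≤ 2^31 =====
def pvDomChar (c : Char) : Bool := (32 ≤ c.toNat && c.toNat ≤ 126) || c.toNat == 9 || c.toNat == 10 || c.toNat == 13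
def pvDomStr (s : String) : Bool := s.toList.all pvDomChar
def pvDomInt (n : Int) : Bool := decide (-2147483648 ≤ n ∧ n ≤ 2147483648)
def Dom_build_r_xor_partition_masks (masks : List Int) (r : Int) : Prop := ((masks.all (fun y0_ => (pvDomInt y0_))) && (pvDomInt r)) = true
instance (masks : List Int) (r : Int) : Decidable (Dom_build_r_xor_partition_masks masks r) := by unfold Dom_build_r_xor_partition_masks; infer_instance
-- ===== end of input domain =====

-- B transposes the mask matrix once into 5 column bitmasks and computes each
-- combination's odd-parity mask by XOR-ing whole columns, removing A's per-mask
-- inner parity loop (objective: alternative).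

-- ===== PORT A =====
def build_r_xor_partition_masks (masks : List Int) (r : Int) : List (Int × Int) :=
  let dom := masks.length
  let full : Int := (1 <<< (dom : Int)) - 1
  (PySem.List.combinations (PySem.List.pyRange 0 5 1) r.toNat).foldl (fun out idxs =>
    let b0 : Int := (PySem.List.enumerate masks).foldl (fun b0 km =>
      let p : Int := idxs.foldl (fun p i => PySem.Int.bxor p (PySem.Int.band (km.2 >>> i) 1)) 0
      if p = 0 then PySem.Int.bor b0 ((1:Int) <<< km.1) else b0) 0
    let b1 := PySem.Int.bxor full b0
    out ++ [(b0, b1)]) []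

-- ===== PORT B =====
def build_r_xor_partition_masks_alt (masks : List Int) (r : Int) : List (Int × Int) :=
  let full : Int := (1 <<< (masks.length : Int)) - 1
  let combos := PySem.List.combinations (PySem.List.pyRange 0 5 1) r.toNat
  if combos.isEmpty then [] else
    -- cols[i] packs bit i of every mask, one bit per mask index
    let cols : List Int := (PySem.List.pyRange 0 5 1).map (fun i =>
      ((PySem.List.enumerate masks).map (fun km => (PySem.Int.band (km.2 >>> i) 1) <<< km.1)).sum)
    combos.foldl (fun out idxs =>
      -- cols[i] is always in range (0 ≤ i < 5 = len cols), so pyGetD is exact here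
      let b1 : Int := idxs.foldl (fun b1 i => PySem.Int.bxor b1 (PySem.List.pyGetD cols i 0)) 0
      out ++ [(PySem.Int.bxor full b1, b1)]) []

-- ===== PRECONDITION & SPEC =====
-- Python A raises ValueError on r < 0 (combinations demands a non-negative r); excluded.
def Pre_build_r_xor_partition_masks (masks : List Int) (r : Int) : Prop := 0 ≤ r
instance (masks : List Int) (r : Int) : Decidable (Pre_build_r_xor_partition_masks masks r) := by unfold Pre_build_r_xor_partition_masks; infer_instance

def pvWitness_build_r_xor_partition_masks : List Int × Int := ([5, 3], 2)

def Spec_build_r_xor_partition_masks (masks : List Int) (r : Int) (out : List (Int × Int)) : Prop := out = build_r_xor_partition_masks_alt masks r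
instance (masks : List Int) (r : Int) (out : List (Int × Int)) : Decidable (Spec_build_r_xor_partition_masks masks r out) := by unfold Spec_build_r_xor_partition_masks; infer_instance

-- ===== CLAIM (what is proved, stated in full; the proofs are below) =====
def Claim_equal_build_r_xor_partition_masks : Prop := ∀ (masks : List Int) (r : Int), Dom_build_r_xor_partition_masks masks r → Pre_build_r_xor_partition_masks masks r → Spec_build_r_xor_partition_masks masks r (build_r_xor_partition_masks masks r)

-- ===== LEMMAS AND PROOFS =====

-- the Nat with exactly the bits j < n where c j holds
def pvOfBits (c : Nat → Bool) (n : Nat) : Nat := ((List.range n).map (fun s => if c s then 2^s else 0)).sum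

theorem pvOfBits_lt (c : Nat → Bool) (n : Nat) : pvOfBits c n < 2^n := by
  induction n with
  | zero => simp [pvOfBits]
  | succ n ih =>
    unfold pvOfBits at *
    rw [List.range_succ, List.map_append, List.sum_append]
    have : 2^(n+1) = 2^n + 2^n := by ring
    simp only [List.map_cons, List.map_nil, List.sum_cons, List.sum_nil]
    by_cases hc : c n <;> simp [hc] <;> omega

theorem pvTestBit_add_two_pow (a n j : Nat) (h : a < 2^n) :
    (a + 2^n).testBit j = (a.testBit j || decide (j = n)) := by
  rw [Nat.add_comm, show 2^n + a = 2^n ||| a from by simpa using Nat.two_pow_add_eq_or_of_lt h 1]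
  rw [Nat.testBit_or, Nat.testBit_two_pow]
  simp [Bool.or_comm, eq_comm]

theorem pvOfBits_testBit (c : Nat → Bool) (n j : Nat) :
    (pvOfBits c n).testBit j = (decide (j < n) && c j) := by
  induction n with
  | zero => simp [pvOfBits]
  | succ n ih =>
    have step : pvOfBits c (n+1) = pvOfBits c n + (if c n then 2^n else 0) := by
      unfold pvOfBits; rw [List.range_succ]; simp
    rw [step]
    by_cases hc : c n
    · rw [if_pos hc, pvTestBit_add_two_pow _ _ _ (pvOfBits_lt c n), ih]
      by_cases hj : j = n
      · subst hj; simp [hc]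
      · by_cases hj2 : j < n <;> simp [hj, hj2] <;> omega
    · rw [if_neg hc, Nat.add_zero, ih]
      by_cases hj : j = n
      · subst hj; simp [hc]
      · by_cases hj2 : j < n <;> simp [hj, hj2] <;> omega

-- bit k of the Python int m (m >> k & 1, Python-exact also for negative m)
def pvBit (m : Int) (k : Nat) : Bool := decide (PySem.Int.band (m >>> ((k : Nat) : Int)) 1 = 1)

theorem pvBand01 (m : Int) (k : Nat) :
    PySem.Int.band (m >>> ((k : Nat) : Int)) 1 = if pvBit m k then 1 else 0 := by
  have h1 : 0 ≤ PySem.Int.band (m >>> ((k : Nat) : Int)) 1 := by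
    rw [PySem.Int.band_one]; exact PySem.Int.mod_nonneg _ (by norm_num)
  have h2 : PySem.Int.band (m >>> ((k : Nat) : Int)) 1 < 2 := by
    rw [PySem.Int.band_one]; exact PySem.Int.mod_lt _ (by norm_num)
  unfold pvBit
  by_cases h : PySem.Int.band (m >>> ((k : Nat) : Int)) 1 = 1 <;> simp [h] <;> omega

-- parity over the chosen bit positions l of mask m
def pvPar (m : Int) (l : List Nat) : Bool := l.foldl (fun p k => p ^^ pvBit m k) false

theorem pvParFold (m : Int) : ∀ (l : List Nat) (b : Bool),
    l.foldl (fun (p : Int) (k : Nat) => PySem.Int.bxor p (PySem.Int.band (m >>> ((k : Nat) : Int)) 1)) (if b then 1 else 0)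
      = if l.foldl (fun p k => p ^^ pvBit m k) b then (1:Int) else 0 := by
  intro l
  induction l with
  | nil => intro b; rfl
  | cons k t ih =>
    intro b
    rw [List.foldl_cons, List.foldl_cons, pvBand01]
    have : PySem.Int.bxor (if b then 1 else 0) (if pvBit m k then 1 else 0)
        = if (b ^^ pvBit m k) then (1:Int) else 0 := by
      cases b <;> cases h : pvBit m k <;> simp [h] <;> decide
    rw [this, ih]

-- cast of A's or-accumulating fold to Nat
theorem pvFoldA_cast (q : Nat → Bool) : ∀ (sl : List Nat) (a : Nat),
    sl.foldl (fun (b0 : Int) (j : Nat) => if q j then PySem.Int.bor b0 ((1:Int) <<< ((j:Nat):Int)) else b0) (a : Int)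
      = ((sl.foldl (fun (b0 : Nat) (j : Nat) => if q j then b0 ||| 2^j else b0) a : Nat) : Int) := by
  intro sl
  induction sl with
  | nil => intro a; rfl
  | cons j t ih =>
    intro a
    rw [List.foldl_cons, List.foldl_cons]
    by_cases hq : q j
    · rw [if_pos hq, if_pos hq]
      rw [Int.shiftLeft_natCast_right, show ((1:Int) <<< j) = ((2^j : Nat) : Int) from by
        rw [← Int.shiftLeft_natCast_right, Int.one_shiftLeft]]
      rw [PySem.Int.bor_natCast]
      exact ih _
    · rw [if_neg hq, if_neg hq]; exact ih _

-- A's range-indexed or-fold builds exactly pvOfBits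
theorem pvFoldA_ofBits (q : Nat → Bool) (n : Nat) :
    (List.range n).foldl (fun (a : Nat) (j : Nat) => if q j then a ||| 2^j else a) 0 = pvOfBits q n := by
  induction n with
  | zero => simp [pvOfBits]
  | succ n ih =>
    rw [List.range_succ, List.foldl_append, ih]
    have step : pvOfBits q (n+1) = pvOfBits q n + (if q n then 2^n else 0) := by
      unfold pvOfBits; rw [List.range_succ]; simp
    rw [step, List.foldl_cons, List.foldl_nil]
    by_cases hq : q n
    · rw [if_pos hq, if_pos hq]
      have hlt := pvOfBits_lt q n
      apply Nat.eq_of_testBit_eq; intro j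
      rw [pvTestBit_add_two_pow _ _ _ hlt, Nat.testBit_or, Nat.testBit_two_pow,
        show (decide (n = j)) = (decide (j = n)) from by simp [eq_comm]]
    · simp [hq]

-- xor-fold commutes with testBit
theorem pvFoldXor_testBit (C : Nat → Nat) : ∀ (l : List Nat) (a : Nat) (j : Nat),
    (l.foldl (fun b k => b ^^^ C k) a).testBit j = l.foldl (fun p k => p ^^ (C k).testBit j) (a.testBit j) := by
  intro l
  induction l with
  | nil => intros; rfl
  | cons k t ih =>
    intro a j
    rw [List.foldl_cons, List.foldl_cons, ih, Nat.testBit_xor]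

theorem pvFoldXor_false (l : List Nat) (b : Bool) : l.foldl (fun p _ => p ^^ false) b = b := by
  induction l generalizing b with
  | nil => rfl
  | cons k t ih => rw [List.foldl_cons]; simp [ih]

-- the full mask (1 << n) - 1 as a Nat
theorem pvFull_cast (n : Nat) : (1 <<< ((n : Nat) : Int)) - 1 = ((2^n - 1 : Nat) : Int) := by
  rw [Int.one_shiftLeft]
  have : 1 ≤ 2^n := Nat.one_le_two_pow
  push_cast [this]
  ring

-- THE HEART: for any list l of bit positions, A's even-parity membership mask b0 and
-- B's column-xor odd-parity mask b1 are bitwise complements inside the n low bits.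
theorem pvCore (n : Nat) (c : Nat → Bool) :
    pvOfBits (fun j => !(c j)) n = (2^n - 1) ^^^ pvOfBits c n := by
  apply Nat.eq_of_testBit_eq; intro j
  simp only [Nat.testBit_xor, Nat.testBit_two_pow_sub_one, pvOfBits_testBit]
  by_cases hj : j < n <;> cases hc : c j <;> simp [hj, hc]

-- ===== reduction of both ports to the common Nat picture =====

theorem pvParFold0 (m : Int) (l : List Nat) :
    l.foldl (fun (p : Int) (k : Nat) => PySem.Int.bxor p (PySem.Int.band (m >>> ((k:Nat):Int)) 1)) 0
      = if pvPar m l then 1 else 0 := pvParFold m l false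

theorem pvCondA (m : Int) (l : List Nat) :
    ((l.foldl (fun (p : Int) (k : Nat) => PySem.Int.bxor p (PySem.Int.band (m >>> ((k:Nat):Int)) 1)) 0 = 0))
      = ((!pvPar m l) = true) := by
  apply propext
  rw [pvParFold0]
  cases h : pvPar m l <;> simp

-- B's column k as a Nat
def pvC (masks : List Int) (k : Nat) : Nat := pvOfBits (fun j => pvBit (masks.getD j 0) k) masks.length

theorem pvColEq (masks : List Int) (k : Nat) :
    ((PySem.List.enumerate masks).map (fun km => (PySem.Int.band (km.2 >>> ((k:Nat):Int)) 1) <<< km.1)).sum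
      = ((pvC masks k : Nat) : Int) := by
  rw [PySem.List.enumerate_eq_map_pyRange masks 0, List.map_map]
  rw [show PySem.List.len masks = ((masks.length : Nat) : Int) from by simp [pysem]]
  rw [PySem.List.pyRange_zero_nat, List.map_map]
  rw [pvC, pvOfBits, Nat.cast_list_sum, List.map_map]
  apply congrArg List.sum
  apply List.map_congr_left
  intro j _
  simp only [Function.comp_apply, PySem.List.pyGetD_natCast]
  rw [pvBand01]
  cases h : pvBit (masks.getD j 0) k <;> simp [Int.zero_shiftLeft', Int.one_shiftLeft]

theorem pvB0Eq (masks : List Int) (l : List Nat) :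
    (PySem.List.enumerate masks).foldl (fun (b0 : Int) km =>
      if (l.foldl (fun (p : Int) (k : Nat) => PySem.Int.bxor p (PySem.Int.band (km.2 >>> ((k:Nat):Int)) 1)) 0) = 0
      then PySem.Int.bor b0 ((1:Int) <<< km.1) else b0) 0
    = ((pvOfBits (fun j => !pvPar (masks.getD j 0) l) masks.length : Nat) : Int) := by
  rw [PySem.List.enumerate_eq_map_pyRange masks 0, List.foldl_map]
  rw [show PySem.List.len masks = ((masks.length : Nat) : Int) from by simp [pysem]]
  rw [PySem.List.pyRange_zero_nat, List.foldl_map]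
  rw [PySem.List.foldl_congr_mem _ _ (fun (b0 : Int) (j : Nat) =>
      if (!pvPar (masks.getD j 0) l) = true then PySem.Int.bor b0 ((1:Int) <<< ((j:Nat):Int)) else b0) _
    (by intro acc j _; simp only [PySem.List.pyGetD_natCast, pvCondA])]
  have h := pvFoldA_cast (fun j => !pvPar (masks.getD j 0) l) (List.range masks.length) 0
  rw [pvFoldA_ofBits] at h
  exact h

theorem pvFoldXor_cast (C : Nat → Nat) : ∀ (l : List Nat) (a : Nat),
    l.foldl (fun (b : Int) (k : Nat) => PySem.Int.bxor b ((C k : Nat) : Int)) ((a : Nat) : Int)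
      = ((l.foldl (fun b k => b ^^^ C k) a : Nat) : Int) := by
  intro l
  induction l with
  | nil => intro a; rfl
  | cons k t ih =>
    intro a
    rw [List.foldl_cons, List.foldl_cons, PySem.Int.bxor_natCast]
    exact ih _

theorem pvB1Nat (masks : List Int) (l : List Nat) :
    l.foldl (fun b k => b ^^^ pvC masks k) 0
      = pvOfBits (fun j => pvPar (masks.getD j 0) l) masks.length := by
  apply Nat.eq_of_testBit_eq
  intro j
  rw [pvFoldXor_testBit, pvOfBits_testBit]
  by_cases hj : j < masks.length
  · simp only [pvC, pvOfBits_testBit, hj, decide_true, Bool.true_and, Nat.zero_testBit]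
    rfl
  · simp only [pvC, pvOfBits_testBit, hj, decide_false, Bool.false_and, Nat.zero_testBit]
    exact pvFoldXor_false l false

theorem pvMain (masks : List Int) (r : Int) :
    build_r_xor_partition_masks masks r = build_r_xor_partition_masks_alt masks r := by
  unfold build_r_xor_partition_masks build_r_xor_partition_masks_alt
  by_cases hc : (PySem.List.combinations (PySem.List.pyRange 0 5 1) r.toNat).isEmpty
  · rw [if_pos hc]
    rw [List.isEmpty_iff.mp hc]
    rfl
  rw [if_neg hc]
  have hcomb : PySem.List.combinations (PySem.List.pyRange 0 5 1) r.toNat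
      = (PySem.List.combinations (List.range 5) r.toNat).map (List.map (fun (k : Nat) => ((k:Nat):Int))) := by
    rw [show PySem.List.pyRange 0 5 1 = (List.range 5).map (fun (k : Nat) => ((k:Nat):Int)) from by decide,
      PySem.List.combinations_map]
  rw [hcomb]
  rw [PySem.List.foldl_append_singleton_eq_map, PySem.List.foldl_append_singleton_eq_map,
    List.nil_append, List.nil_append, List.map_map, List.map_map]
  apply List.map_congr_left
  intro l hlc
  have hsub : l.Sublist (List.range 5) := PySem.List.sublist_of_mem_combinations hlc
  have hmem : ∀ k ∈ l, k < 5 := fun k hk => List.mem_range.mp (hsub.subset hk)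
  simp only [Function.comp_apply, List.foldl_map]
  rw [pvB0Eq masks l]
  rw [show (5:Int) = ((5:Nat):Int) from by norm_num]
  rw [PySem.List.foldl_congr_mem _ _ (fun (b1 : Int) (k : Nat) =>
      PySem.Int.bxor b1 ((pvC masks k : Nat) : Int)) _
    (by
      intro acc k hk
      rw [PySem.List.pyGetD_map_pyRange _ 5 k 0 (hmem k hk), pvColEq masks k])]
  have hb1 : l.foldl (fun (b : Int) (k : Nat) => PySem.Int.bxor b ((pvC masks k : Nat) : Int)) (0:Int)
      = ((l.foldl (fun b k => b ^^^ pvC masks k) 0 : Nat) : Int) := pvFoldXor_cast (pvC masks) l 0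
  rw [hb1, pvB1Nat masks l, pvFull_cast masks.length, PySem.Int.bxor_natCast, PySem.Int.bxor_natCast]
  rw [pvCore masks.length (fun j => pvPar (masks.getD j 0) l),
    ← Nat.xor_assoc, Nat.xor_self, Nat.zero_xor]

-- ===== VERDICT (by name: the statement is the Claim_ definition above) =====
theorem build_r_xor_partition_masks_spec : Claim_equal_build_r_xor_partition_masks := by
  intro masks r _ _
  show build_r_xor_partition_masks masks r = build_r_xor_partition_masks_alt masks r
  exact pvMain masks r
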